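-- pv_equiv track=rewrite | github.com/jeffxhansen/RubiksCubeRobot | cube.py | getCommonFace
-- ===== SOURCE A (Python) =====
-- def getCommonFace(cubies:list):
--     edge = cubies[0]
--     face = ""
--     for ch in edge:
--         if all(ch in cubie for cubie in cubies):
--             face = ch
--             break
--
--     return face
-- ===== SOURCE B (Python) =====
-- def getCommonFace(cubies: list):
--     # two-phase: build the set of characters common to all cubies, then one ordered scan of cubies[0]
--     common = set(cubies[0])
--     for cubie in cubies[1:]:
--         common &= set(cubie)
--     for ch in cubies[0]:
--         if ch in common:
--             return ch
--     return ""
-- ===== Notes on version B (the rewrite author's own statement) =====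
-- stated objective: alternative
-- what changed: Replaces the nested rescan (for each char of cubies[0], an all(...) pass over every cubie) by a two-phase algorithm: build the intersection set of all cubies' characters once, then one ordered scan of cubies[0] with a set lookup; it trades A's early exit for a single pass over the whole input.
import Mathlib
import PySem

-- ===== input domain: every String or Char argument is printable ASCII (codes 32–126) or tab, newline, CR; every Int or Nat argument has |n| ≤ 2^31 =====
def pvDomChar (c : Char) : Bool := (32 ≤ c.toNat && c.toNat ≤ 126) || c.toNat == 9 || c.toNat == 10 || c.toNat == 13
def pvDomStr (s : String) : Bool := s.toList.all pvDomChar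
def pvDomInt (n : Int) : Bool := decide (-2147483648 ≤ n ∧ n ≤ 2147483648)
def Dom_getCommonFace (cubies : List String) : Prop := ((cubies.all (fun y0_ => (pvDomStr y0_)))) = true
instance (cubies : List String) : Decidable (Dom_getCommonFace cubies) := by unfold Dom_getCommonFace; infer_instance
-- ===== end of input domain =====

-- B builds the intersection set of all cubies's characters once, then makes one ordered scan of
-- cubies[0] (objective: alternative two-phase algorithm instead of A's nested rescan).


-- ===== PORT A =====
-- A's for-loop with break: first ch of edge with all(ch in cubie for cubie in cubies), else "".
-- 'ch in cubie' for a single character ch is exactly char membership in cubie's characters.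
def loopA (cubies : List String) : List Char → String
  | [] => ""
  | ch :: rest =>
      if cubies.all (fun cubie => cubie.toList.contains ch) then String.ofList [ch]
      else loopA cubies rest

def getCommonFace (cubies : List String) : String :=
  loopA cubies (cubies.headD "").toList   -- cubies[0]; Pre_ excludes [], where Python raises IndexError

-- ===== PORT B =====
def scanB (common : PySem.Set Char) : List Char → String
  | [] => ""
  | ch :: rest => if PySem.Set.contains common ch then String.ofList [ch] else scanB common rest

def getCommonFace_alt (cubies : List String) : String :=
  let edge := cubies.headD ""   -- cubies[0]; Pre_ excludes [], where Python raises TypeError-free IndexError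
  let common : PySem.Set Char :=
    (cubies.drop 1).foldl (fun acc cubie => PySem.Set.inter acc (PySem.Set.ofList cubie.toList))
      (PySem.Set.ofList edge.toList)
  scanB common edge.toList

-- ===== PRECONDITION & SPEC =====
-- Pre_ excludes only the empty list, on which Python A (cubies[0]) raises IndexError.
def Pre_getCommonFace (cubies : List String) : Prop := cubies ≠ []
instance (cubies : List String) : Decidable (Pre_getCommonFace cubies) := by unfold Pre_getCommonFace; infer_instance
def pvWitness_getCommonFace : List String := ["abc", "cb"]

def Spec_getCommonFace (cubies : List String) (out : String) : Prop := out = getCommonFace_alt cubies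
instance (cubies : List String) (out : String) : Decidable (Spec_getCommonFace cubies out) := by unfold Spec_getCommonFace; infer_instance

-- ===== CLAIM (what is proved, stated in full; the proofs are below) =====
def Claim_equal_getCommonFace : Prop := ∀ (cubies : List String), Dom_getCommonFace cubies → Pre_getCommonFace cubies → Spec_getCommonFace cubies (getCommonFace cubies)

-- ===== LEMMAS AND PROOFS =====

-- membership in the folded intersection
theorem mem_foldl_inter (rest : List String) (acc : PySem.Set Char) (x : Char) :
    x ∈ rest.foldl (fun a s => PySem.Set.inter a (PySem.Set.ofList s.toList)) acc ↔
      x ∈ acc ∧ ∀ s ∈ rest, x ∈ s.toList := by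
  induction rest generalizing acc with
  | nil => simp
  | cons s rest ih =>
      simp [List.foldl_cons, ih, PySem.Set.mem_inter, PySem.Set.mem_ofList]
      tauto

-- on characters drawn from e, A's scan and B's scan agree
theorem loopA_eq_scanB (e : String) (rest : List String) (cs : List Char)
    (h : ∀ ch ∈ cs, ch ∈ e.toList) :
    loopA (e :: rest) cs =
      scanB ((rest.foldl (fun a s => PySem.Set.inter a (PySem.Set.ofList s.toList))
        (PySem.Set.ofList e.toList))) cs := by
  induction cs with
  | nil => rfl
  | cons ch cs ih =>
      have hch : ch ∈ e.toList := h ch (by simp)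
      have hcond : ((e :: rest).all (fun cubie => cubie.toList.contains ch)) =
          PySem.Set.contains ((rest.foldl (fun a s => PySem.Set.inter a (PySem.Set.ofList s.toList))
            (PySem.Set.ofList e.toList))) ch := by
        rw [Bool.eq_iff_iff]
        simp [List.all_eq_true, mem_foldl_inter, PySem.Set.mem_ofList, hch]
      simp only [loopA, scanB, hcond]
      split
      · rfl
      · exact ih (fun c hc => h c (by simp [hc]))

-- ===== VERDICT (by name: the statement is the Claim_ definition above) =====
theorem getCommonFace_spec : Claim_equal_getCommonFace := by
  intro cubies _ hpre
  unfold Spec_getCommonFace getCommonFace getCommonFace_alt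
  cases cubies with
  | nil => exact absurd rfl hpre
  | cons e rest =>
      simp only [List.headD_cons, List.drop_one, List.tail_cons]
      exact loopA_eq_scanB e rest e.toList (fun _ h => h)
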